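-- pv_equiv track=rewrite | github.com/taosicheng2001/MyDynamoRIO | test/summary.py | cmp_and_j
-- ===== SOURCE A (Python) =====
-- def cmp_and_j(inst_list):
--     cmp_and_j_count = 0
--     last_inst = "*"
--     for inst in inst_list:
--         if last_inst == "cmp" and inst[0] == "j":
--             cmp_and_j_count = cmp_and_j_count + 1
--         last_inst = inst
--     return cmp_and_j_count
-- ===== SOURCE B (Python) =====
-- def cmp_and_j(inst_list):
--     n = len(inst_list)
--     cmp_positions = [i for i, inst in enumerate(inst_list) if inst == "cmp"]
--     total = 0
--     for i in cmp_positions: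
--         if i + 1 < n and inst_list[i + 1][0] == "j":
--             total += 1
--     return total
-- ===== Notes on version B (the rewrite author's own statement) =====
-- stated objective: alternative
-- what changed: Replaces A's stateful single pass tracking last_inst with a '*' sentinel by a two-stage index-based computation: first collect the positions of all 'cmp' instructions, then count those positions whose in-range successor starts with 'j'.
import Mathlib
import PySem

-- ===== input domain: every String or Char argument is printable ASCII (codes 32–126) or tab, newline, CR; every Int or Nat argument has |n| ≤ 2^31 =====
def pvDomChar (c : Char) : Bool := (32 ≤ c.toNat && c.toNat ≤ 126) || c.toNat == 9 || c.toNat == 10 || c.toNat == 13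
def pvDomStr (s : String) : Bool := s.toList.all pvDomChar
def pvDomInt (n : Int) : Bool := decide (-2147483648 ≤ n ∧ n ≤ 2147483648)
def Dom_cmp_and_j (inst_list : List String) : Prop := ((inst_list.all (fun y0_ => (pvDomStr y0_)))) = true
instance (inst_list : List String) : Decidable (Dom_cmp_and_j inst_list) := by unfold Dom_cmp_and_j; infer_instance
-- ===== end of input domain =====

-- B replaces A's stateful single pass (last_inst with a "*" sentinel) by a two-stage
-- computation: collect the indices of all "cmp" instructions first, then count those
-- whose in-range successor starts with 'j'; objective: alternative. Return values only.

-- ===== PORT A =====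
-- A's loop: state (count, last_inst); inst[0] == "j" via PySem.Str.pyGet?
-- (none exactly where Python raises IndexError on the empty string; Pre_ excludes those inputs).
def cmp_and_j (inst_list : List String) : Int :=
  (inst_list.foldl
    (fun (s : Int × String) inst =>
      (if s.2 = "cmp" ∧ PySem.Str.pyGet? inst 0 = some 'j' then s.1 + 1 else s.1, inst))
    (0, "*")).1

-- ===== PORT B =====
-- inst_list[i + 1] is guarded by i + 1 < n with i ≥ 0, so PySem.List.pyGetD is exact there.
def cmp_and_j_alt (inst_list : List String) : Int :=
  let n : Int := inst_list.length
  let cmp_positions :=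
    ((PySem.List.enumerate inst_list).filter (fun p => p.2 == "cmp")).map (·.1)
  cmp_positions.foldl
    (fun total i =>
      if i + 1 < n ∧ PySem.Str.pyGet? (PySem.List.pyGetD inst_list (i + 1) "") 0 = some 'j'
      then total + 1 else total) 0

-- ===== PRECONDITION & SPEC =====
-- Pre_ excludes exactly the inputs where Python A (and Python B) raise IndexError:
-- an empty-string instruction immediately following a "cmp".
def Pre_cmp_and_j (inst_list : List String) : Prop :=
  ∀ p ∈ inst_list.zip (inst_list.drop 1), p.1 = "cmp" → p.2 ≠ ""
instance (inst_list : List String) : Decidable (Pre_cmp_and_j inst_list) := by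
  unfold Pre_cmp_and_j; infer_instance
def pvWitness_cmp_and_j : List String := ["cmp", "je", "mov", "cmp", "jmp"]

def Spec_cmp_and_j (inst_list : List String) (out : Int) : Prop := out = cmp_and_j_alt inst_list
instance (inst_list : List String) (out : Int) : Decidable (Spec_cmp_and_j inst_list out) := by
  unfold Spec_cmp_and_j; infer_instance

-- ===== CLAIM (what is proved, stated in full; the proofs are below) =====
def Claim_equal_cmp_and_j : Prop := ∀ (inst_list : List String), Dom_cmp_and_j inst_list → Pre_cmp_and_j inst_list → Spec_cmp_and_j inst_list (cmp_and_j inst_list)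

-- ===== LEMMAS AND PROOFS =====

-- the adjacent-pair predicate both counts reduce to
def pvPair (p : String × String) : Bool :=
  decide (p.1 = "cmp" ∧ PySem.Str.pyGet? p.2 0 = some 'j')

-- A's fold from state (c, last) counts c plus the matching adjacent pairs of (last :: l).
theorem cmp_and_j_fold_eq (l : List String) (c : Int) (last : String) :
    (l.foldl
      (fun (s : Int × String) inst =>
        (if s.2 = "cmp" ∧ PySem.Str.pyGet? inst 0 = some 'j' then s.1 + 1 else s.1, inst))
      (c, last)).1 =
    ((last :: l).zip l).foldl
      (fun acc p => if p.1 = "cmp" ∧ PySem.Str.pyGet? p.2 0 = some 'j' then acc + 1 else acc) c := by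
  induction l generalizing c last with
  | nil => rfl
  | cons x xs ih =>
      simp only [List.foldl, List.zip_cons_cons]
      exact ih _ x

-- shifting the start of enumerate shifts the indices seen by a countP predicate
theorem countP_enumerate_shift (l : List String) (s : Int) (Q : Int × String → Bool) :
    (PySem.List.enumerate l (s + 1)).countP Q
      = (PySem.List.enumerate l s).countP (fun p => Q (p.1 + 1, p.2)) := by
  induction l generalizing s with
  | nil => rfl
  | cons x xs ih =>
      simp only [PySem.List.enumerate_cons, List.countP_cons, ih]

-- B's index-based count over "cmp" positions equals the adjacent-pair count.
theorem countP_idx_eq_pair (l : List String) :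
    (PySem.List.enumerate l 0).countP
        (fun p => (p.2 == "cmp") &&
          decide (p.1 + 1 < (l.length : Int) ∧
            PySem.Str.pyGet? (PySem.List.pyGetD l (p.1 + 1) "") 0 = some 'j'))
      = (l.zip (l.drop 1)).countP pvPair := by
  induction l with
  | nil => rfl
  | cons x xs ih =>
      rw [PySem.List.enumerate_cons, List.countP_cons, countP_enumerate_shift]
      show (PySem.List.enumerate xs 0).countP
            (fun p => (p.2 == "cmp") &&
              decide (p.1 + 1 + 1 < ((x :: xs).length : Int) ∧
                PySem.Str.pyGet? (PySem.List.pyGetD (x :: xs) (p.1 + 1 + 1) "") 0 = some 'j'))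
          + (if ((x == "cmp") && decide ((0 : Int) + 1 < ((x :: xs).length : Int) ∧
                PySem.Str.pyGet? (PySem.List.pyGetD (x :: xs) ((0 : Int) + 1) "") 0 = some 'j')) = true
             then 1 else 0)
          = ((x :: xs).zip xs).countP pvPair
      have hcongr :
          (PySem.List.enumerate xs 0).countP
            (fun p => (p.2 == "cmp") &&
              decide (p.1 + 1 + 1 < ((x :: xs).length : Int) ∧
                PySem.Str.pyGet? (PySem.List.pyGetD (x :: xs) (p.1 + 1 + 1) "") 0 = some 'j'))
          = (PySem.List.enumerate xs 0).countP
            (fun p => (p.2 == "cmp") &&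
              decide (p.1 + 1 < (xs.length : Int) ∧
                PySem.Str.pyGet? (PySem.List.pyGetD xs (p.1 + 1) "") 0 = some 'j')) := by
        apply List.countP_congr
        intro p hp
        obtain ⟨k, hk, rfl⟩ := (PySem.List.mem_enumerate_iff _ _ _).1 hp
        have h0 : (0 : Int) + (k : Int) = (k : Int) := by omega
        simp only [h0]
        have hlen : ((x :: xs).length : Int) = (xs.length : Int) + 1 := by
          simp [List.length_cons]
        have hidx : PySem.List.pyGetD (x :: xs) ((k : Int) + 1 + 1) ""
            = PySem.List.pyGetD xs ((k : Int) + 1) "" := by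
          rw [PySem.List.pyGetD_of_nonneg _ _ (by omega),
              PySem.List.pyGetD_of_nonneg _ _ (by omega)]
          have h2 : ((k : Int) + 1 + 1).toNat = ((k : Int) + 1).toNat + 1 := by omega
          rw [h2, List.getD_cons_succ]
        rw [hidx, hlen]
        simp only [Bool.and_eq_true, decide_eq_true_eq]
        constructor <;> (rintro ⟨h1, h2, h3⟩; exact ⟨h1, by omega, h3⟩)
      rw [hcongr, ih]
      cases xs with
      | nil => simp
      | cons y t =>
          have hidx : PySem.List.pyGetD (x :: y :: t) (1 : Int) "" = y := by
            rw [PySem.List.pyGetD_of_nonneg _ _ (by omega)]; rfl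
          simp [pvPair, List.zip_cons_cons, List.countP_cons, hidx]

-- ===== VERDICT (by name: the statement is the Claim_ definition above) =====
theorem cmp_and_j_spec : Claim_equal_cmp_and_j := by
  intro inst_list _ _
  show cmp_and_j inst_list = cmp_and_j_alt inst_list
  unfold cmp_and_j cmp_and_j_alt
  rw [cmp_and_j_fold_eq]
  -- A side: the "*" sentinel pair never matches, leaving the adjacent-pair count
  have hA :
      ((("*" :: inst_list).zip inst_list).foldl
        (fun acc p => if p.1 = "cmp" ∧ PySem.Str.pyGet? p.2 0 = some 'j' then acc + 1 else acc)
        (0 : Int))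
      = ((inst_list.zip (inst_list.drop 1)).countP pvPair : Int) := by
    cases inst_list with
    | nil => rfl
    | cons x xs =>
        simp only [List.drop_one, List.tail_cons, List.zip_cons_cons, List.foldl]
        rw [if_neg (fun h => absurd h.1 (by decide))]
        rw [PySem.List.foldl_ite_add_one, zero_add]
        rfl
  rw [hA]
  -- B side: fold over cmp_positions → countP over enumerate (the two-stage count)
  rw [PySem.List.foldl_ite_add_one, zero_add]
  rw [List.countP_map, List.countP_filter]
  rw [← countP_idx_eq_pair inst_list]
  congr 1
  apply List.countP_congr
  intro p _
  simp [Bool.and_comm]
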